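-- pv_equiv track=rewrite | github.com/dale-wahl/endpoint_mapper | src/relationship_mapper.py | _categorize_endpoints
-- ===== SOURCE A (Python) =====
-- from typing import List, Dict
--
-- def _categorize_endpoints(endpoints: List[str]) -> Dict:
--     """
--     Categorize endpoints by their apparent purpose.
--
--     Args:
--         endpoints: List of endpoint URLs
--
--     Returns:
--         Dictionary with categorized endpoints
--     """
--     categories = {
--         "authentication": [],
--         "user_management": [],
--         "data_retrieval": [],
--         "crud_operations": [],
--         "graphql": [],
--         "other": [],
--     }
--
--     for endpoint in endpoints:
--         endpoint_lower = endpoint.lower()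
--
--         # Authentication endpoints
--         if any(
--             auth_term in endpoint_lower
--             for auth_term in [
--                 "auth",
--                 "login",
--                 "logout",
--                 "token",
--                 "session",
--                 "signin",
--                 "signup",
--             ]
--         ):
--             categories["authentication"].append(endpoint)
--
--         # User management
--         elif any(
--             user_term in endpoint_lower
--             for user_term in ["user", "profile", "account", "member"]
--         ):
--             categories["user_management"].append(endpoint)
--
--         # GraphQL
--         elif "graphql" in endpoint_lower:
--             categories["graphql"].append(endpoint)
--
--         # CRUD operations (based on path structure)
--         elif any(
--             crud_term in endpoint_lower
--             for crud_term in ["create", "update", "delete", "edit", "add", "remove"]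
--         ):
--             categories["crud_operations"].append(endpoint)
--
--         # Data retrieval (common patterns)
--         elif any(
--             data_term in endpoint_lower
--             for data_term in ["get", "list", "search", "find", "fetch", "data"]
--         ):
--             categories["data_retrieval"].append(endpoint)
--
--         else:
--             categories["other"].append(endpoint)
--
--     # Remove empty categories
--     return {cat: endpoints for cat, endpoints in categories.items() if endpoints}
-- ===== SOURCE B (Python) =====
-- from typing import List, Dict
--
-- _RULES = [
--     ("authentication", ["auth", "login", "logout", "token", "session", "signin", "signup"]),
--     ("user_management", ["user", "profile", "account", "member"]),
--     ("graphql", ["graphql"]),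
--     ("crud_operations", ["create", "update", "delete", "edit", "add", "remove"]),
--     ("data_retrieval", ["get", "list", "search", "find", "fetch", "data"]),
-- ]
--
-- _ORDER = ["authentication", "user_management", "data_retrieval",
--           "crud_operations", "graphql", "other"]
--
--
-- def _classify(lower: str) -> str:
--     for cat, terms in _RULES:
--         if any(term in lower for term in terms):
--             return cat
--     return "other"
--
--
-- def _categorize_endpoints(endpoints: List[str]) -> Dict:
--     labeled = [(e, _classify(e.lower())) for e in endpoints]
--     result = {}
--     for cat in _ORDER:
--         group = [e for e, label in labeled if label == cat]
--         if group:
--             result[cat] = group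
--     return result
-- ===== Notes on version B (the rewrite author's own statement) =====
-- stated objective: idiomatic
-- what changed: Replaces the six-branch if/elif chain appending into a pre-built dict by a table-driven design: an ordered rule table classifies each endpoint once, then one per-category filter pass over the labeled list assembles only the non-empty groups (no post-hoc empty-category filter).
import Mathlib
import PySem

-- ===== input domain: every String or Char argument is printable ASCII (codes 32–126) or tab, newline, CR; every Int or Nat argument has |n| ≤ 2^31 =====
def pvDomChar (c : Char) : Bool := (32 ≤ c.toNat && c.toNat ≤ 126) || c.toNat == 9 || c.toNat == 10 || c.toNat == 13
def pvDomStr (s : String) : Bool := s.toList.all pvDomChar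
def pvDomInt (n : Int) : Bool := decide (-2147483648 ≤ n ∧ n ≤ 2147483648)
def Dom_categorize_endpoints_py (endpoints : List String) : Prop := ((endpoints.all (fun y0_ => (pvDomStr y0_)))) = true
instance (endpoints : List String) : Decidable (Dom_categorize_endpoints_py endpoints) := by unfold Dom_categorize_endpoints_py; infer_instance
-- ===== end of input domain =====

-- B is a table-driven re-implementation (classify once, assemble per category); same return value, no speed claim.

-- ===== PORT A =====
-- state: the six category lists in the dict's insertion order
def pvStepA (c : List String × List String × List String × List String × List String × List String)
    (e : String) : List String × List String × List String × List String × List String × List String :=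
  match c with
  | (a, u, d, cr, g, o) =>
    let el := PySem.Str.lower e
    if ["auth", "login", "logout", "token", "session", "signin", "signup"].any
        (fun t => PySem.Str.isIn t el) then (a ++ [e], u, d, cr, g, o)
    else if ["user", "profile", "account", "member"].any
        (fun t => PySem.Str.isIn t el) then (a, u ++ [e], d, cr, g, o)
    else if PySem.Str.isIn "graphql" el then (a, u, d, cr, g ++ [e], o)
    else if ["create", "update", "delete", "edit", "add", "remove"].any
        (fun t => PySem.Str.isIn t el) then (a, u, d, cr ++ [e], g, o)
    else if ["get", "list", "search", "find", "fetch", "data"].any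
        (fun t => PySem.Str.isIn t el) then (a, u, d ++ [e], cr, g, o)
    else (a, u, d, cr, g, o ++ [e])

def categorize_endpoints_py (endpoints : List String) : List (String × List String) :=
  match endpoints.foldl pvStepA ([], [], [], [], [], []) with
  | (a, u, d, cr, g, o) =>
    ([("authentication", a), ("user_management", u), ("data_retrieval", d),
      ("crud_operations", cr), ("graphql", g), ("other", o)]).filter
      (fun p => !p.2.isEmpty)

-- ===== PORT B =====
def pvRules : List (String × List String) :=
  [("authentication", ["auth", "login", "logout", "token", "session", "signin", "signup"]),
   ("user_management", ["user", "profile", "account", "member"]),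
   ("graphql", ["graphql"]),
   ("crud_operations", ["create", "update", "delete", "edit", "add", "remove"]),
   ("data_retrieval", ["get", "list", "search", "find", "fetch", "data"])]

def pvClassify : List (String × List String) → String → String
  | [], _ => "other"
  | (cat, terms) :: rest, el =>
      if terms.any (fun t => PySem.Str.isIn t el) then cat else pvClassify rest el

def pvOrder : List String :=
  ["authentication", "user_management", "data_retrieval", "crud_operations", "graphql", "other"]

def categorize_endpoints_py_alt (endpoints : List String) : List (String × List String) :=
  let labeled := endpoints.map (fun e => (e, pvClassify pvRules (PySem.Str.lower e)))
  pvOrder.foldl (fun acc cat =>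
    let group := (labeled.filter (fun p => p.2 == cat)).map Prod.fst
    if group.isEmpty then acc else acc ++ [(cat, group)]) []

-- ===== PRECONDITION & SPEC =====
def Spec_categorize_endpoints_py (endpoints : List String) (out : List (String × List String)) : Prop := out = categorize_endpoints_py_alt endpoints
instance (endpoints : List String) (out : List (String × List String)) : Decidable (Spec_categorize_endpoints_py endpoints out) := by unfold Spec_categorize_endpoints_py; infer_instance

-- ===== CLAIM (what is proved, stated in full; the proofs are below) =====
def Claim_equal_categorize_endpoints_py : Prop := ∀ (endpoints : List String), Dom_categorize_endpoints_py endpoints → Spec_categorize_endpoints_py endpoints (categorize_endpoints_py endpoints)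

-- ===== LEMMAS AND PROOFS =====

-- the classification of one endpoint, shared vocabulary for both sides
def pvLabel (e : String) : String := pvClassify pvRules (PySem.Str.lower e)

-- selecting a group out of the labeled list is filtering by label
theorem pvGroup_eq (es : List String) (cat : String) :
    ((es.map (fun e => (e, pvLabel e))).filter (fun p => p.2 == cat)).map Prod.fst
      = es.filter (fun e => pvLabel e == cat) := by
  induction es with
  | nil => rfl
  | cons x xs ih =>
      by_cases h : pvLabel x == cat <;> simp [List.filter, h, ih]

-- B's assembling fold is a map-then-filter
theorem pvFoldB (l : List String) (g : String → List String)
    (acc : List (String × List String)) :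
    l.foldl (fun acc cat => if (g cat).isEmpty then acc else acc ++ [(cat, g cat)]) acc
      = acc ++ (l.map (fun c => (c, g c))).filter (fun p => !p.2.isEmpty) := by
  induction l generalizing acc with
  | nil => simp
  | cons x xs ih =>
      by_cases h : (g x).isEmpty
      · rw [List.foldl_cons, if_pos h, ih, List.map_cons, List.filter_cons]
        simp [h]
      · rw [List.foldl_cons, if_neg h, ih, List.map_cons, List.filter_cons]
        simp [h]

-- one step of A updates exactly the bucket pvLabel selects
set_option maxHeartbeats 1000000 in
theorem pvStepA_eq (a u d cr g o : List String) (e : String) :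
    pvStepA (a, u, d, cr, g, o) e =
      (a ++ if pvLabel e == "authentication" then [e] else [],
       u ++ if pvLabel e == "user_management" then [e] else [],
       d ++ if pvLabel e == "data_retrieval" then [e] else [],
       cr ++ if pvLabel e == "crud_operations" then [e] else [],
       g ++ if pvLabel e == "graphql" then [e] else [],
       o ++ if pvLabel e == "other" then [e] else []) := by
  simp only [pvStepA, pvLabel, pvRules, pvClassify]
  split_ifs <;> simp_all

-- A's fold computes the six filters
theorem pvFoldA (es : List String) (a u d cr g o : List String) :
    es.foldl pvStepA (a, u, d, cr, g, o) =
      (a ++ es.filter (fun e => pvLabel e == "authentication"),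
       u ++ es.filter (fun e => pvLabel e == "user_management"),
       d ++ es.filter (fun e => pvLabel e == "data_retrieval"),
       cr ++ es.filter (fun e => pvLabel e == "crud_operations"),
       g ++ es.filter (fun e => pvLabel e == "graphql"),
       o ++ es.filter (fun e => pvLabel e == "other")) := by
  induction es generalizing a u d cr g o with
  | nil => simp
  | cons x xs ih =>
      simp only [List.foldl_cons, pvStepA_eq, ih, List.filter_cons]
      by_cases h1 : pvLabel x == "authentication" <;>
        by_cases h2 : pvLabel x == "user_management" <;>
          by_cases h3 : pvLabel x == "data_retrieval" <;>
            by_cases h4 : pvLabel x == "crud_operations" <;>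
              by_cases h5 : pvLabel x == "graphql" <;>
                by_cases h6 : pvLabel x == "other" <;>
                  simp_all

-- ===== VERDICT (by name: the statement is the Claim_ definition above) =====
theorem categorize_endpoints_py_spec : Claim_equal_categorize_endpoints_py := by
  intro endpoints _
  show categorize_endpoints_py endpoints = categorize_endpoints_py_alt endpoints
  unfold categorize_endpoints_py categorize_endpoints_py_alt
  simp only [pvFoldA, List.nil_append]
  have hg : ∀ cat, ((endpoints.map (fun e => (e, pvClassify pvRules (PySem.Str.lower e)))).filter
      (fun p => p.2 == cat)).map Prod.fst = endpoints.filter (fun e => pvLabel e == cat) := by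
    intro cat; exact pvGroup_eq endpoints cat
  simp only [hg]
  rw [pvFoldB pvOrder (fun cat => endpoints.filter (fun e => pvLabel e == cat)) []]
  simp [pvOrder]
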